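-- pv_equiv track=rewrite | github.com/sgavriil01/Polyglot-Meeting-Assistant | backend/src/models/search.py | _smart_chunk_text
-- ===== SOURCE A (Python) =====
-- from typing import List, Dict, Any, Optional, Tuple
--
-- def _smart_chunk_text(text: str, target_chunks: int = 8, overlap: int = 300) -> List[str]:
--     """
--     Smart text chunking for search indexing with overlap and semantic boundaries
--
--     Args:
--         text: Text to chunk
--         target_chunks: Target number of chunks
--         overlap: Character overlap between chunks
--
--     Returns:
--         List of text chunks
--     """
--     text_length = len(text)
--     chunk_size = text_length // target_chunks
--
--     # Ensure minimum chunk size for meaningful search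
--     chunk_size = max(chunk_size, 800)
--
--     # Split by sentences for better semantic boundaries
--     sentences = text.split('. ')
--     chunks = []
--     current_chunk = []
--     current_length = 0
--
--     for sentence in sentences:
--         sentence_length = len(sentence)
--
--         if current_length + sentence_length > chunk_size and current_chunk:
--             # Add overlap from previous chunk for context preservation
--             if chunks and overlap > 0:
--                 prev_chunk = chunks[-1]
--                 overlap_start = max(0, len(prev_chunk) - overlap)
--                 overlap_text = prev_chunk[overlap_start:]
--                 current_chunk.insert(0, overlap_text)
--
--             chunks.append(". ".join(current_chunk) + ".")
--             current_chunk = [sentence.strip(".")]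
--             current_length = sentence_length
--         else:
--             current_chunk.append(sentence.strip("."))
--             current_length += sentence_length
--
--     if current_chunk:
--         chunks.append(". ".join(current_chunk) + ".")
--
--     # Limit to target number and ensure quality
--     return chunks[:target_chunks]
-- ===== SOURCE B (Python) =====
-- from typing import List
--
-- def _smart_chunk_text(text: str, target_chunks: int = 8, overlap: int = 300) -> List[str]:
--     """Greedy-take re-implementation: instead of a per-sentence state machine,
--     repeatedly take a maximal group of sentences that fits the chunk size, render
--     it (prepending the overlap tail of the previous chunk when more groups follow),
--     and continue on the remaining sentences."""
--     chunk_size = max(len(text) // target_chunks, 800)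
--
--     def take(ss):
--         # first sentence always joins the group; then extend while it still fits
--         group = [ss[0].strip(".")]
--         total = len(ss[0])
--         i = 1
--         while i < len(ss) and total + len(ss[i]) <= chunk_size:
--             group.append(ss[i].strip("."))
--             total += len(ss[i])
--             i += 1
--         return group, ss[i:]
--
--     chunks = []
--     prev = None
--     rest = text.split('. ')
--     while rest:
--         group, rest = take(rest)
--         if prev is not None and rest and overlap > 0:
--             group = [prev[max(0, len(prev) - overlap):]] + group
--         chunk = ". ".join(group) + "."
--         chunks.append(chunk)
--         prev = chunk
--     return chunks[:target_chunks]
-- ===== Notes on version B (the rewrite author's own statement) =====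
-- stated objective: alternative
-- what changed: B replaces A's per-sentence state machine (accumulating current_chunk/current_length and flushing on overflow inside one fold) with a greedy outer loop that repeatedly takes a maximal group of sentences fitting the chunk size from the remaining list, renders it, and prepends the previous chunk's overlap tail only when more groups follow.
import Mathlib
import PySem

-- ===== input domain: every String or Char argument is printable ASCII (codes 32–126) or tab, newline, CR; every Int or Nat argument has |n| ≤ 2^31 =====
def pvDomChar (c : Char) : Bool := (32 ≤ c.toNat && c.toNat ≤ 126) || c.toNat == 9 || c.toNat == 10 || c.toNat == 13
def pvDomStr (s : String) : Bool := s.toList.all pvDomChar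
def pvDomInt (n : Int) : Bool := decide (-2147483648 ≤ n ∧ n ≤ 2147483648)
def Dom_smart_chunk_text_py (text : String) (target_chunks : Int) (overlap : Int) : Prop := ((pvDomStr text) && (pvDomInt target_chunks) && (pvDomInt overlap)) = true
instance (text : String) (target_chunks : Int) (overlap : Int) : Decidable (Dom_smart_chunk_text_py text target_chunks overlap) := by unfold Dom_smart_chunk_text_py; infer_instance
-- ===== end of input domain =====

-- B re-implements A by a greedy outer loop (take a maximal fitting sentence group, render,
-- repeat on the rest); same return values wherever A returns — objective: alternative.

-- ===== PORT A =====
-- sentence.strip(".")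
def pvStripDotsA (s : List Char) : List Char := PySem.Chars.stripChars s ['.']
-- ". ".join(g)
def pvJoinA (g : List (List Char)) : List Char := PySem.Chars.join ['.', ' '] g
-- prev_chunk[max(0, len(prev_chunk) - overlap):]  (the start index is ≥ 0, so drop is exact)
def pvOvTailA (overlap : Int) (prev : List Char) : List Char :=
  prev.drop (max 0 ((prev.length : Int) - overlap)).toNat
-- the body of A's for-loop, state = (chunks, current_chunk, current_length)
def pvStepA (chunk_size overlap : Int) :
    List (List Char) × List (List Char) × Int → List Char →
    List (List Char) × List (List Char) × Int
  | (chunks, cur, len), s =>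
    if len + (s.length : Int) > chunk_size ∧ cur ≠ [] then
      let cur' :=
        if chunks ≠ [] ∧ overlap > 0 then
          match chunks.getLast? with          -- chunks[-1]; chunks is known non-empty here
          | some prev => pvOvTailA overlap prev :: cur   -- current_chunk.insert(0, overlap_text)
          | none => cur
        else cur
      (chunks ++ [pvJoinA cur' ++ ['.']], [pvStripDotsA s], (s.length : Int))
    else (chunks, cur ++ [pvStripDotsA s], len + (s.length : Int))

def smart_chunk_text_py (text : String) (target_chunks : Int) (overlap : Int) : List String :=
  let tl := text.toList
  let chunk_size := max (PySem.Int.floordiv (tl.length : Int) target_chunks) 800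
  let sentences := PySem.Chars.splitOn tl ['.', ' ']       -- text.split('. ')
  let st := sentences.foldl (pvStepA chunk_size overlap) ([], [], 0)
  let chunks := if st.2.1 ≠ [] then st.1 ++ [pvJoinA st.2.1 ++ ['.']] else st.1
  (PySem.List.slice chunks none (some target_chunks)).map String.ofList   -- chunks[:target_chunks]

-- ===== PORT B =====
-- the while loop inside Source B's take(): extend the group while the next sentence keeps the
-- running total within chunk_size; returns (taken stripped sentences, remaining sentences)
def pvTakeGo (cs : Int) (total : Int) : List (List Char) → List (List Char) × List (List Char)
  | [] => ([], [])
  | s :: ss =>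
    if total + (s.length : Int) ≤ cs then
      let t := pvTakeGo cs (total + (s.length : Int)) ss
      (PySem.Chars.stripChars s ['.'] :: t.1, t.2)
    else ([], s :: ss)

-- the remainder take() returns never gets longer (for the outer loop's termination)
theorem pvTakeGo_len (cs total : Int) (ss : List (List Char)) :
    (pvTakeGo cs total ss).2.length ≤ ss.length := by
  induction ss generalizing total with
  | nil => simp [pvTakeGo]
  | cons s ss ih =>
    unfold pvTakeGo
    split
    · exact le_trans (ih _) (Nat.le_succ _)
    · simp

-- Source B's outer while loop: take a maximal group from the front, prepend the overlap tail of
-- the previously built chunk when more sentences remain, render, recurse on the remainder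
def pvBuildB (ov cs : Int) : Option (List Char) → List (List Char) → List (List Char)
  | _, [] => []
  | prev, s :: ss =>
    let t := pvTakeGo cs ((s.length : Int)) ss
    let group := PySem.Chars.stripChars s ['.'] :: t.1
    let group' :=
      match prev with
      | some p =>
        if t.2 ≠ [] ∧ ov > 0 then
          (p.drop (max 0 ((p.length : Int) - ov)).toNat) :: group
        else group
      | none => group
    let chunk := PySem.Chars.join ['.', ' '] group' ++ ['.']
    chunk :: pvBuildB ov cs (some chunk) t.2
  termination_by _ l => l.length
  decreasing_by simpa using Nat.lt_succ_of_le (pvTakeGo_len cs _ ss)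

def smart_chunk_text_py_alt (text : String) (target_chunks : Int) (overlap : Int) : List String :=
  let tl := text.toList
  let chunk_size := max (PySem.Int.floordiv (tl.length : Int) target_chunks) 800
  let built := pvBuildB overlap chunk_size none (PySem.Chars.splitOn tl ['.', ' '])
  (PySem.List.slice built none (some target_chunks)).map String.ofList

-- ===== PRECONDITION & SPEC =====
-- A raises ZeroDivisionError when target_chunks = 0 (text_length // target_chunks); excluded.
def Pre_smart_chunk_text_py (text : String) (target_chunks : Int) (overlap : Int) : Prop :=
  target_chunks ≠ 0
instance (text : String) (target_chunks : Int) (overlap : Int) : Decidable (Pre_smart_chunk_text_py text target_chunks overlap) := by unfold Pre_smart_chunk_text_py; infer_instance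
def pvWitness_smart_chunk_text_py : String × Int × Int := ("Hello. World. Bye.", 3, 5)

def Spec_smart_chunk_text_py (text : String) (target_chunks : Int) (overlap : Int) (out : List String) : Prop := out = smart_chunk_text_py_alt text target_chunks overlap
instance (text : String) (target_chunks : Int) (overlap : Int) (out : List String) : Decidable (Spec_smart_chunk_text_py text target_chunks overlap out) := by unfold Spec_smart_chunk_text_py; infer_instance

-- ===== CLAIM (what is proved, stated in full; the proofs are below) =====
def Claim_equal_smart_chunk_text_py : Prop := ∀ (text : String) (target_chunks : Int) (overlap : Int), Dom_smart_chunk_text_py text target_chunks overlap → Pre_smart_chunk_text_py text target_chunks overlap → Spec_smart_chunk_text_py text target_chunks overlap (smart_chunk_text_py text target_chunks overlap)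

-- ===== LEMMAS AND PROOFS =====

-- text.split('. ') is never empty
theorem pv_go_ne_nil (sep : List Char) (fuel : Nat) (l cur : List Char) (acc : List (List Char)) :
    PySem.Chars.splitOn.go sep fuel l cur acc ≠ [] := by
  fun_induction PySem.Chars.splitOn.go <;> simp_all

theorem pv_splitOn_ne_nil (s sep : List Char) : PySem.Chars.splitOn s sep ≠ [] := by
  unfold PySem.Chars.splitOn; exact pv_go_ne_nil _ _ _ _ _

-- proof-side intermediate: the sentence groups A's loop decides, as a recursion
def pvGroups (cs : Int) : List (List Char) → List (List Char) → Int → List (List (List Char))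
  | [], cur, _ => [cur]
  | s :: ss, cur, len =>
    if len + (s.length : Int) > cs ∧ cur ≠ [] then
      cur :: pvGroups cs ss [pvStripDotsA s] (s.length : Int)
    else
      pvGroups cs ss (cur ++ [pvStripDotsA s]) (len + (s.length : Int))

theorem pvGroups_ne_nil (cs : Int) (ss : List (List Char)) (cur : List (List Char)) (len : Int) :
    pvGroups cs ss cur len ≠ [] := by
  induction ss generalizing cur len with
  | nil => simp [pvGroups]
  | cons s ss ih => unfold pvGroups; split <;> simp [ih]

theorem pvGroups_cons (cs : Int) (ss : List (List Char)) (cur : List (List Char)) (len : Int) :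
    ∃ g gs, pvGroups cs ss cur len = g :: gs := by
  cases h : pvGroups cs ss cur len with
  | nil => exact absurd h (pvGroups_ne_nil cs ss cur len)
  | cons g gs => exact ⟨g, gs, rfl⟩

-- proof-side intermediate: render the groups, threading the previously built chunk
def pvRender (ov : Int) : Option (List Char) → List (List (List Char)) → List (List Char)
  | _, [] => []
  | prev, g :: gs =>
    let g' :=
      match prev, gs with
      | some p, _ :: _ => if ov > 0 then pvOvTailA ov p :: g else g
      | _, _ => g
    let b := pvJoinA g' ++ ['.']
    b :: pvRender ov (some b) gs

theorem pvRender_last (ov : Int) (prev : Option (List Char)) (g : List (List Char)) :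
    pvRender ov prev [g] = [pvJoinA g ++ ['.']] := by cases prev <;> rfl

theorem pvRender_none_cons₂ (ov : Int) (g0 g : List (List Char)) (gs : List (List (List Char))) :
    pvRender ov none (g0 :: g :: gs)
      = (pvJoinA g0 ++ ['.']) :: pvRender ov (some (pvJoinA g0 ++ ['.'])) (g :: gs) := rfl

theorem pvRender_some_cons₂ (ov : Int) (p : List Char) (g0 g : List (List Char))
    (gs : List (List (List Char))) :
    pvRender ov (some p) (g0 :: g :: gs)
      = (pvJoinA (if ov > 0 then pvOvTailA ov p :: g0 else g0) ++ ['.'])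
          :: pvRender ov (some (pvJoinA (if ov > 0 then pvOvTailA ov p :: g0 else g0) ++ ['.'])) (g :: gs) := by
  by_cases hov : ov > 0 <;> simp [pvRender, hov]

-- A side: A's loop (plus its final flush) renders the remaining groups after the already-built
-- chunks, taking overlap from the last already-built chunk
theorem pv_main (cs ov : Int) (ss : List (List Char))
    (chunks : List (List Char)) (cur : List (List Char)) (len : Int) (hcur : cur ≠ []) :
    (if (ss.foldl (pvStepA cs ov) (chunks, cur, len)).2.1 ≠ [] then
        (ss.foldl (pvStepA cs ov) (chunks, cur, len)).1 ++
          [pvJoinA (ss.foldl (pvStepA cs ov) (chunks, cur, len)).2.1 ++ ['.']]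
      else (ss.foldl (pvStepA cs ov) (chunks, cur, len)).1)
      = chunks ++ pvRender ov chunks.getLast? (pvGroups cs ss cur len) := by
  induction ss generalizing chunks cur len with
  | nil =>
    simp only [List.foldl_nil, pvGroups]
    rw [if_pos hcur, pvRender_last]
  | cons s ss ih =>
    simp only [List.foldl_cons, pvStepA, pvGroups]
    by_cases hc : len + (s.length : Int) > cs ∧ cur ≠ []
    · rw [if_pos hc, if_pos hc]
      obtain ⟨g, gs, hg⟩ := pvGroups_cons cs ss [pvStripDotsA s] (s.length : Int)
      rw [hg]
      cases hch : chunks.getLast? with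
      | none =>
        have hchn : chunks = [] := List.getLast?_eq_none_iff.mp hch
        subst hchn
        rw [pvRender_none_cons₂]
        simp only [ne_eq, not_true_eq_false, false_and, if_false]
        rw [ih _ _ _ (by simp), hg]
        simp
      | some p =>
        have hcne : chunks ≠ [] := by
          intro h; subst h; simp at hch
        rw [pvRender_some_cons₂]
        by_cases hov : ov > 0
        · have hifA : (if chunks ≠ [] ∧ ov > 0 then
              match some p with
              | some prev => pvOvTailA ov prev :: cur
              | none => cur
            else cur) = pvOvTailA ov p :: cur := by
            rw [if_pos ⟨hcne, hov⟩]
          rw [hifA, if_pos hov]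
          rw [ih _ _ _ (by simp), hg]
          simp
        · have hifA : (if chunks ≠ [] ∧ ov > 0 then
              match some p with
              | some prev => pvOvTailA ov prev :: cur
              | none => cur
            else cur) = cur := by
            rw [if_neg (by tauto)]
          rw [hifA, if_neg hov]
          rw [ih _ _ _ (by simp), hg]
          simp
    · rw [if_neg hc, if_neg hc]
      exact ih _ _ _ (by simp)

-- B side, step 1: the groups of the remainder a take leaves behind
def pvGroupsRest (cs : Int) : List (List Char) → List (List (List Char))
  | [] => []
  | r :: rs => pvGroups cs rs [pvStripDotsA r] (r.length : Int)

theorem pv_groups_take (cs : Int) (ss : List (List Char)) (cur : List (List Char)) (len : Int)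
    (hcur : cur ≠ []) :
    pvGroups cs ss cur len =
      (cur ++ (pvTakeGo cs len ss).1) :: pvGroupsRest cs (pvTakeGo cs len ss).2 := by
  induction ss generalizing cur len with
  | nil => simp [pvGroups, pvTakeGo, pvGroupsRest]
  | cons s ss ih =>
    unfold pvGroups pvTakeGo
    by_cases hc : len + (s.length : Int) ≤ cs
    · rw [if_neg (by simp; omega), if_pos hc]
      rw [ih _ _ (by simp)]
      simp [pvStripDotsA]
    · rw [if_pos ⟨by omega, hcur⟩, if_neg hc]
      simp [pvGroupsRest]

-- B side, step 2: rendering the groups of an open singleton start = B's build loop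
theorem pv_render_build (ov cs : Int) (n : Nat) (s : List Char) (ss : List (List Char))
    (prev : Option (List Char)) (hn : ss.length ≤ n) :
    pvRender ov prev (pvGroups cs ss [pvStripDotsA s] (s.length : Int))
      = pvBuildB ov cs prev (s :: ss) := by
  induction n generalizing s ss prev with
  | zero =>
    have hss : ss = [] := List.length_eq_zero_iff.mp (Nat.le_zero.mp hn)
    subst hss
    cases prev <;>
      simp [pvGroups, pvBuildB, pvTakeGo, pvRender, pvStripDotsA, pvJoinA]
  | succ n ih =>
    rw [pv_groups_take cs ss [pvStripDotsA s] (s.length : Int) (by simp)]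
    rw [pvBuildB.eq_def]
    cases h : (pvTakeGo cs ((s.length : Int)) ss).2 with
    | nil =>
      cases prev <;>
        simp [h, pvGroupsRest, pvRender, pvBuildB, pvJoinA, pvStripDotsA]
    | cons r rs =>
      have hlen : rs.length ≤ n := by
        have := pvTakeGo_len cs ((s.length : Int)) ss
        rw [h] at this; simp at this; omega
      simp only [pvGroupsRest]
      obtain ⟨g, gs, hg⟩ := pvGroups_cons cs rs [pvStripDotsA r] (r.length : Int)
      rw [hg]
      cases prev with
      | none =>
        rw [pvRender_none_cons₂, ← hg, ih r rs _ hlen]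
        simp [h, pvJoinA, pvStripDotsA]
      | some p =>
        rw [pvRender_some_cons₂, ← hg]
        by_cases hov : ov > 0
        · rw [if_pos hov, ih r rs _ hlen]
          simp [h, hov, pvJoinA, pvStripDotsA, pvOvTailA]
        · rw [if_neg hov, ih r rs _ hlen]
          simp [h, hov, pvJoinA, pvStripDotsA]

-- ===== VERDICT (by name: the statement is the Claim_ definition above) =====
theorem smart_chunk_text_py_spec : Claim_equal_smart_chunk_text_py := by
  intro text target_chunks overlap _ _
  unfold Spec_smart_chunk_text_py
  simp only [smart_chunk_text_py, smart_chunk_text_py_alt]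
  obtain ⟨s0, ss, hs⟩ : ∃ s0 ss, PySem.Chars.splitOn text.toList ['.', ' '] = s0 :: ss := by
    cases h : PySem.Chars.splitOn text.toList ['.', ' '] with
    | nil => exact absurd h (pv_splitOn_ne_nil _ _)
    | cons a b => exact ⟨a, b, rfl⟩
  rw [hs]
  set cs := max (PySem.Int.floordiv ((text.toList.length : Int)) target_chunks) 800 with hcs
  -- the first sentence goes to the (empty) current chunk on A's side
  have hA : (s0 :: ss).foldl (pvStepA cs overlap) ([], [], 0)
      = ss.foldl (pvStepA cs overlap) ([], [pvStripDotsA s0], 0 + (s0.length : Int)) := by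
    simp [pvStepA]
  rw [hA]
  have hmain := pv_main cs overlap ss [] [pvStripDotsA s0] (0 + (s0.length : Int)) (by simp)
  simp only [List.nil_append, List.getLast?_nil, zero_add] at hmain ⊢
  rw [hmain, pv_render_build overlap cs ss.length s0 ss none le_rfl]
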